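-- pv_equiv track=rewrite | github.com/srwlli/mcp-server | docs-mcp/generators/mermaid_formatter.py | _group_by_module
-- ===== SOURCE A (Python) =====
-- from typing import Dict, List, Any, Optional, Set, Tuple
-- from collections import defaultdict
--
-- def _group_by_module(nodes: List[Dict]) -> Dict[str, List[Dict]]:
--     """Group nodes by their file/module."""
--     modules = defaultdict(list)
--
--     for node in nodes:
--         file_path = node.get('file', 'unknown')
--         # Extract module name from file path
--         if '/' in file_path:
--             module = file_path.rsplit('/', 1)[-1].replace('.py', '').replace('.ts', '').replace('.js', '')
--         elif '\\' in file_path: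
--             module = file_path.rsplit('\\', 1)[-1].replace('.py', '').replace('.ts', '').replace('.js', '')
--         else:
--             module = file_path.replace('.py', '').replace('.ts', '').replace('.js', '')
--
--         modules[module].append(node)
--
--     return dict(modules)
-- ===== SOURCE B (Python) =====
-- def _module_key(node):
--     file_path = node.get('file', 'unknown')
--     if '/' in file_path:
--         return file_path.rsplit('/', 1)[-1].replace('.py', '').replace('.ts', '').replace('.js', '')
--     elif '\\' in file_path:
--         return file_path.rsplit('\\', 1)[-1].replace('.py', '').replace('.ts', '').replace('.js', '')
--     else:
--         return file_path.replace('.py', '').replace('.ts', '').replace('.js', '')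
--
-- def _group_by_module(nodes):
--     """Group nodes by their file/module: distinct keys in first-appearance order, then filter per key."""
--     keys = [_module_key(n) for n in nodes]
--     return {k: [n for n, kk in zip(nodes, keys) if kk == k]
--             for k in dict.fromkeys(keys)}
-- ===== Notes on version B (the rewrite author's own statement) =====
-- stated objective: alternative
-- what changed: A accumulates node lists in a defaultdict in one pass; B extracts each node's module key up front, takes the distinct keys in first-appearance order (dict.fromkeys), and builds each group by filtering the node/key pairs per key.
import Mathlib
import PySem

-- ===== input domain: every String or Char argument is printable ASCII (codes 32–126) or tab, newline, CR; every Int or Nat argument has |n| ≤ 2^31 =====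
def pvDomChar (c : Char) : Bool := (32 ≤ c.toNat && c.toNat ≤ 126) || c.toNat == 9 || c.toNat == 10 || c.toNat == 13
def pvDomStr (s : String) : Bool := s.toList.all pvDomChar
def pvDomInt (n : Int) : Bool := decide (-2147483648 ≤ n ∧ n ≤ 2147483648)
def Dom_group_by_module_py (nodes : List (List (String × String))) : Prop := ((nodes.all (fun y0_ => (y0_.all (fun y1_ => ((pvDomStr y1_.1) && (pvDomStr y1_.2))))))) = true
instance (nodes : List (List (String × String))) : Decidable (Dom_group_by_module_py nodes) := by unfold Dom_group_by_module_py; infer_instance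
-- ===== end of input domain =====

-- B replaces A's one-pass defaultdict accumulation by key extraction + ordered-distinct keys + a filter per key (objective: alternative decomposition, not faster).

-- ===== PORT A =====
-- hand port of s.rsplit(sep,1)[-1] for a single-char sep: the suffix after the LAST
-- occurrence of sep (the whole string if sep is absent) — exact for this use
def pvAfterLast (sep : Char) (cs : List Char) : List Char :=
  cs.foldl (fun acc c => if c = sep then [] else acc ++ [c]) []

-- shared key extraction (A computes it inline per node; B factors it out — same code)
def pvModuleKey (node : List (String × String)) : String :=
  let filePath := (PySem.Dict.mk node).getD "file" "unknown"
  let base :=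
    if PySem.Str.isIn "/" filePath then String.ofList (pvAfterLast '/' filePath.toList)
    else if PySem.Str.isIn "\\" filePath then String.ofList (pvAfterLast '\\' filePath.toList)
    else filePath
  PySem.Str.replace (PySem.Str.replace (PySem.Str.replace base ".py" "") ".ts" "") ".js" ""

def group_by_module_py (nodes : List (List (String × String))) : List (String × List (List (String × String))) :=
  (nodes.foldl (fun modules node => modules.modify (pvModuleKey node) [] (· ++ [node]))
    PySem.Dict.empty).items

-- ===== PORT B =====
def group_by_module_py_alt (nodes : List (List (String × String))) : List (String × List (List (String × String))) :=
  let keys := nodes.map pvModuleKey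
  (PySem.List.dedup keys).map
    (fun k => (k, ((nodes.zip keys).filter (fun p => p.2 == k)).map (·.1)))

-- ===== PRECONDITION & SPEC =====
def Spec_group_by_module_py (nodes : List (List (String × String))) (out : List (String × List (List (String × String)))) : Prop := out = group_by_module_py_alt nodes
instance (nodes : List (List (String × String))) (out : List (String × List (List (String × String)))) : Decidable (Spec_group_by_module_py nodes out) := by unfold Spec_group_by_module_py; infer_instance

-- ===== CLAIM (what is proved, stated in full; the proofs are below) =====
def Claim_equal_group_by_module_py : Prop := ∀ (nodes : List (List (String × String))), Dom_group_by_module_py nodes → Spec_group_by_module_py nodes (group_by_module_py nodes)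

-- ===== LEMMAS AND PROOFS =====

-- a dict with nodup keys is determined pointwise: items = keys paired with getD
theorem pv_items_eq_keys_map {κ ν : Type} [BEq κ] [LawfulBEq κ]
    (d : PySem.Dict κ ν) (h : d.keys.Nodup) (d0 : ν) :
    d.items = d.keys.map (fun k => (k, d.getD k d0)) := by
  have hk : d.keys = d.items.map (·.1) := rfl
  rw [hk, List.map_map]
  symm
  refine (List.map_congr_left ?_).trans (List.map_id _)
  intro p hp
  have hg : d.get? p.1 = some p.2 := by
    have := PySem.Dict.get?_of_mem_items (d := d) (k := p.1) (v := p.2)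
    exact this (by simpa using hp) h
  simp [Function.comp, PySem.Dict.getD_of_get?_eq_some d d0 hg]

theorem group_by_module_py_agree (nodes : List (List (String × String))) :
    group_by_module_py nodes = group_by_module_py_alt nodes := by
  unfold group_by_module_py group_by_module_py_alt
  have hnodup : ((nodes.foldl
      (fun modules node => modules.modify (pvModuleKey node) [] (· ++ [node]))
      (PySem.Dict.empty : PySem.Dict String (List (List (String × String))))).keys).Nodup :=
    PySem.Dict.nodup_keys_foldl_modify_key nodes pvModuleKey [] (fun _ n => (· ++ [n])) _ (by simp)
  rw [pv_items_eq_keys_map _ hnodup []]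
  have hkeys : (nodes.foldl
      (fun modules node => modules.modify (pvModuleKey node) [] (· ++ [node]))
      (PySem.Dict.empty : PySem.Dict String (List (List (String × String))))).keys =
      PySem.List.dedup (nodes.map pvModuleKey) := by
    have h := PySem.Dict.keys_foldl_modify_key nodes pvModuleKey
      ([] : List (List (String × String))) (fun _ n => (· ++ [n])) PySem.Dict.empty
    simp only [PySem.Dict.keys_empty] at h
    exact h.trans (by rw [PySem.List.dedup_eq_ofList, PySem.Set.ofList_eq_foldl]; rfl)
  rw [hkeys]
  apply List.map_congr_left
  intro k _
  -- A's loop over nodes is the standard grouping loop over (key, node) pairs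
  have hF : (nodes.foldl
      (fun modules node => modules.modify (pvModuleKey node) [] (· ++ [node]))
      (PySem.Dict.empty : PySem.Dict String (List (List (String × String))))) =
      ((nodes.map (fun n => (pvModuleKey n, n))).foldl
        (fun d p => d.modify p.1 [] (· ++ [p.2])) PySem.Dict.empty) :=
    (List.foldl_map (f := fun n : List (String × String) => (pvModuleKey n, n))
      (g := fun (d : PySem.Dict String (List (List (String × String)))) p => d.modify p.1 [] (· ++ [p.2]))).symm
  rw [hF, PySem.Dict.getD_foldl_modify_append]
  have hz : nodes.zip (nodes.map pvModuleKey) = nodes.map (fun n => (n, pvModuleKey n)) := by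
    simpa using (List.zip_map' (f := id) (g := pvModuleKey) (l := nodes))
  simp [hz, List.filter_map, List.map_map, Function.comp_def]

-- ===== VERDICT (by name: the statement is the Claim_ definition above) =====
theorem group_by_module_py_spec : Claim_equal_group_by_module_py := by
  intro nodes _
  exact group_by_module_py_agree nodes
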